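-- pv_equiv track=rewrite | github.com/DresscodeCasual/world-results | editor/runner_stat.py | eddington
-- ===== SOURCE A (Python) =====
-- from typing import Iterable, List, Optional, Tuple
--
-- def needed_for_next_step(next_val: int, lengths: Iterable[int]) -> int:
-- 	return next_val - sum(length >= next_val * 1000 for length in lengths)
--
-- def eddington(lengths: List[int]) -> Tuple[int, int]:
-- 	if not lengths:
-- 		return 0, 1
-- 	lengths_desc = sorted(lengths, reverse=True)
-- 	for i, length in enumerate(lengths_desc):
-- 		if length < (i + 1) * 1000:
-- 			return i, needed_for_next_step(i + 1, lengths_desc[:i])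
-- 	return len(lengths), needed_for_next_step(len(lengths) + 1, lengths)
-- ===== SOURCE B (Python) =====
-- def _bucket(length, n):
-- 	b = length // 1000
-- 	if b < 0:
-- 		b = 0
-- 	elif b > n + 1:
-- 		b = n + 1
-- 	return b
--
-- def eddington(lengths):
-- 	n = len(lengths)
-- 	buckets = {}
-- 	for length in lengths:
-- 		b = _bucket(length, n)
-- 		buckets[b] = buckets.get(b, 0) + 1
-- 	c = 0
-- 	for i in range(n + 1, 0, -1):
-- 		prev = c
-- 		c += buckets.get(i, 0)
-- 		if c >= i:
-- 			return i, (i + 1) - prev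
-- 	return 0, 1
-- ===== Notes on version B (the rewrite author's own statement) =====
-- stated objective: alternative
-- what changed: Replaces sort-then-scan (sorted descending, first index where d[i] < (i+1)*1000) by a dict bucket count of entries by capped thousands and a single downward counting scan that finds the Eddington number without sorting.
import Mathlib
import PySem

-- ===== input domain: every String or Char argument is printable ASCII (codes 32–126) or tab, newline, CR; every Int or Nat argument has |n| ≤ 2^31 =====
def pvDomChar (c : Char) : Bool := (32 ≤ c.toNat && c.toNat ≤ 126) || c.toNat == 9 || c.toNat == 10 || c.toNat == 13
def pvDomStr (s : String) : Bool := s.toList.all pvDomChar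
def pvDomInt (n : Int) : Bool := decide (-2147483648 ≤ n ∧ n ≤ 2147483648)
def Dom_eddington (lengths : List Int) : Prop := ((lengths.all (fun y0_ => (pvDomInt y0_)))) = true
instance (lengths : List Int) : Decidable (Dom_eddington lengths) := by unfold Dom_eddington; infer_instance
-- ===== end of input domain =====

-- B replaces A's sort-and-scan by bucket counting (dict of capped thousands) and a downward
-- counting scan — a different algorithm with identical return values.

-- ===== PORT A =====
def needed_for_next_step (next_val : Int) (lengths : List Int) : Int :=
  next_val - ((lengths.map (fun length => if next_val * 1000 ≤ length then (1 : Int) else 0)).sum)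

def eddAloop (lengths d : List Int) : List (Int × Int) → Int × Int
  | [] => ((lengths.length : Int), needed_for_next_step ((lengths.length : Int) + 1) lengths)
  | (i, length) :: rest =>
    if length < (i + 1) * 1000 then
      (i, needed_for_next_step (i + 1) (PySem.List.slice d none (some i)))
    else eddAloop lengths d rest

def eddington (lengths : List Int) : Int × Int :=
  if lengths = [] then (0, 1)
  else
    let d := PySem.List.sorted lengths (fun x => x) true
    eddAloop lengths d (PySem.List.enumerate d 0)

-- ===== PORT B =====
def pvBucket (length n : Int) : Int :=
  let b := PySem.Int.floordiv length 1000
  if b < 0 then 0 else if n + 1 < b then n + 1 else b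

def eddBloop (buckets : PySem.Dict Int Int) : Int → List Int → Int × Int
  | _, [] => (0, 1)
  | c, i :: rest =>
    let prev := c
    let c' := c + buckets.getD i 0
    if i ≤ c' then (i, (i + 1) - prev) else eddBloop buckets c' rest

def eddington_alt (lengths : List Int) : Int × Int :=
  let n : Int := lengths.length
  let buckets := lengths.foldl (fun d length =>
    let b := pvBucket length n
    d.insert b (d.getD b 0 + 1)) PySem.Dict.empty
  eddBloop buckets 0 (PySem.List.pyRange (n + 1) 0 (-1))

-- ===== PRECONDITION & SPEC =====
def Spec_eddington (lengths : List Int) (out : Int × Int) : Prop := out = eddington_alt lengths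
instance (lengths : List Int) (out : Int × Int) : Decidable (Spec_eddington lengths out) := by unfold Spec_eddington; infer_instance

-- ===== CLAIM (what is proved, stated in full; the proofs are below) =====
def Claim_equal_eddington : Prop := ∀ (lengths : List Int), Dom_eddington lengths → Spec_eddington lengths (eddington lengths)

-- ===== LEMMAS AND PROOFS =====

-- count of entries of at least v thousand metres
def pvCnt (ls : List Int) (v : Int) : Int := (ls.countP (fun L => decide (v * 1000 ≤ L)) : Int)

-- reference downward scan: greatest k with pvCnt k ≥ k
def pvRef (ls : List Int) : Nat → Int × Int
  | 0 => (0, 1)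
  | k + 1 =>
    if ((k : Int) + 1) ≤ pvCnt ls ((k : Int) + 1)
    then (((k : Int) + 1), ((k : Int) + 2) - pvCnt ls ((k : Int) + 2))
    else pvRef ls k

def pvCntB (ls : List Int) (i : Int) : Int :=
  ((ls.map (fun L => pvBucket L (ls.length : Int))).countP (fun x => decide (i ≤ x)) : Int)

lemma pvCnt_le_len (ls : List Int) (v : Int) : pvCnt ls v ≤ (ls.length : Int) := by
  unfold pvCnt
  exact_mod_cast List.countP_le_length

lemma pvCnt_anti (ls : List Int) {i j : Int} (h : i ≤ j) : pvCnt ls j ≤ pvCnt ls i := by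
  unfold pvCnt
  have := List.countP_mono_left (l := ls) (p := fun L => decide (j * 1000 ≤ L))
    (q := fun L => decide (i * 1000 ≤ L)) (fun x _ hx => by
      simp only [decide_eq_true_eq] at *; nlinarith)
  exact_mod_cast this

lemma pvRef_eq_low (ls : List Int) (k m : Nat) (hk : k ≤ m)
    (h : ∀ j : Nat, k < j → j ≤ m → ¬ ((j : Int) ≤ pvCnt ls (j : Int))) :
    pvRef ls m = pvRef ls k := by
  induction m with
  | zero =>
    have : k = 0 := by omega
    rw [this]
  | succ m ih =>
    rcases Nat.eq_or_lt_of_le hk with hEq | hLt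
    · rw [hEq]
    · have hnot := h (m + 1) (by omega) (by omega)
      have : pvRef ls (m + 1) = pvRef ls m := by
        rw [pvRef, if_neg (by push_cast at hnot; exact hnot)]
      rw [this]
      exact ih (by omega) (fun j h1 h2 => h j h1 (by omega))

lemma pvRef_hit (ls : List Int) (k m : Nat) (hk1 : 1 ≤ k) (hk : k ≤ m)
    (hpass : (k : Int) ≤ pvCnt ls (k : Int)) (hfail : pvCnt ls ((k : Int) + 1) ≤ (k : Int)) :
    pvRef ls m = ((k : Int), ((k : Int) + 1) - pvCnt ls ((k : Int) + 1)) := by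
  have hlow : pvRef ls m = pvRef ls k := by
    apply pvRef_eq_low ls k m hk
    intro j h1 _ hle
    have h2 : ((k : Int) + 1) ≤ (j : Int) := by exact_mod_cast h1
    have := pvCnt_anti ls h2
    omega
  obtain ⟨k', rfl⟩ : ∃ k', k = k' + 1 := ⟨k - 1, by omega⟩
  rw [hlow, pvRef, if_pos (by push_cast at hpass ⊢; exact hpass)]

  have h2 : ((k' : Int) + 2) = ((k' + 1 : Nat) : Int) + 1 := by push_cast; ring
  rw [h2]
  norm_cast

lemma pvRef_zero (ls : List Int) (m : Nat) (h : pvCnt ls 1 ≤ 0) : pvRef ls m = (0, 1) := by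
  have hlow : pvRef ls m = pvRef ls 0 := by
    apply pvRef_eq_low ls 0 m (by omega)
    intro j h1 _ hle
    have h2 : (1 : Int) ≤ (j : Int) := by exact_mod_cast h1
    have := pvCnt_anti ls h2
    omega
  rw [hlow]; rfl

lemma needed_eq (v : Int) (ls : List Int) : needed_for_next_step v ls = v - pvCnt ls v := by
  unfold needed_for_next_step pvCnt
  congr 1
  rw [show (fun length => if v * 1000 ≤ length then (1 : Int) else 0)
      = (fun length => if decide (v * 1000 ≤ length) = true then (1 : Int) else 0) by
    funext L; simp]
  rw [PySem.List.sum_map_ite_one_zero]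

lemma sorted_getElem_anti (d : List Int) (hpw : d.Pairwise (fun a b => b ≤ a))
    {p q : Nat} (hpq : p ≤ q) (hq : q < d.length) :
    d[q] ≤ d[p]'(lt_of_le_of_lt hpq hq) := by
  rcases Nat.eq_or_lt_of_le hpq with rfl | h
  · exact le_refl _
  · exact (List.pairwise_iff_getElem.mp hpw) p q _ hq h

lemma countP_split (d : List Int) (v : Int) (k : Nat) :
    d.countP (fun L => decide (v * 1000 ≤ L)) =
      (d.take k).countP (fun L => decide (v * 1000 ≤ L))
        + (d.drop k).countP (fun L => decide (v * 1000 ≤ L)) := by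
  rw [← List.countP_append, List.take_append_drop]

lemma countP_take_full (d : List Int) (v : Int) (k : Nat) (hk : k ≤ d.length)
    (h : ∀ j (hj : j < k), v * 1000 ≤ d[j]'(lt_of_lt_of_le hj hk)) :
    (d.take k).countP (fun L => decide (v * 1000 ≤ L)) = k := by
  rw [List.countP_eq_length.mpr, List.length_take]
  · omega
  · intro a ha
    obtain ⟨i, hi, rfl⟩ := List.mem_iff_getElem.mp ha
    have hik : i < k := by simp at hi; omega
    rw [List.getElem_take]
    simpa using h i hik

lemma countP_drop_zero (d : List Int) (hpw : d.Pairwise (fun a b => b ≤ a))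
    (v : Int) (k : Nat) (hk : k < d.length) (h : d[k] < v * 1000) :
    (d.drop k).countP (fun L => decide (v * 1000 ≤ L)) = 0 := by
  rw [List.countP_eq_zero]
  intro a ha
  obtain ⟨i, hi, rfl⟩ := List.mem_iff_getElem.mp ha
  have hilen : k + i < d.length := by simp at hi; omega
  rw [List.getElem_drop]
  have hle : d[k + i] ≤ d[k] := sorted_getElem_anti d hpw (by omega) hilen
  simp only [decide_eq_true_eq]
  omega

lemma pvCnt_ge_of_prefix (d : List Int) (v : Int) (k : Nat) (hk : k ≤ d.length)
    (h : ∀ j (hj : j < k), v * 1000 ≤ d[j]'(lt_of_lt_of_le hj hk)) :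
    (k : Int) ≤ pvCnt d v := by
  unfold pvCnt
  have h1 := countP_take_full d v k hk h
  have h2 := countP_split d v k
  have h3 : (d.drop k).countP (fun L => decide (v * 1000 ≤ L)) ≥ 0 := Nat.zero_le _
  omega

lemma eddAloop_spec (lengths d : List Int) (hperm : d.Perm lengths)
    (hpw : d.Pairwise (fun a b => b ≤ a)) (hne : d ≠ [])
    (k : Nat) (hk : k ≤ d.length)
    (hpref : ∀ j (hj : j < k), ((j : Int) + 1) * 1000 ≤ d[j]'(lt_of_lt_of_le hj hk)) :
    eddAloop lengths d (PySem.List.enumerate (d.drop k) (k : Int)) = pvRef lengths d.length := by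
  have hlen : d.length = lengths.length := hperm.length_eq
  have hcnt : ∀ v, pvCnt d v = pvCnt lengths v := fun v => by
    unfold pvCnt; rw [hperm.countP_eq]
  induction hfuel : d.length - k generalizing k with
  | zero =>
    have hke : k = d.length := by omega
    subst hke
    rw [List.drop_length, PySem.List.enumerate_nil]
    show ((lengths.length : Int), needed_for_next_step ((lengths.length : Int) + 1) lengths)
      = pvRef lengths d.length
    rw [needed_eq]
    have hne' : 0 < d.length := List.length_pos_iff.mpr hne
    have hpass : ((d.length : Int)) ≤ pvCnt lengths (d.length : Int) := by
      rw [← hcnt]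
      apply pvCnt_ge_of_prefix d _ d.length le_rfl
      intro j hj
      have h1 : d[j] ≥ d[d.length - 1]'(by omega) :=
        sorted_getElem_anti d hpw (by omega) (by omega)
      have h2 := hpref (d.length - 1) (by omega)
      have h3 : (((d.length - 1 : Nat) : Int) + 1) = (d.length : Int) := by
        omega
      rw [h3] at h2
      omega
    have hfail : pvCnt lengths ((d.length : Int) + 1) ≤ (d.length : Int) := by
      have := pvCnt_le_len lengths ((d.length : Int) + 1)
      omega
    rw [pvRef_hit lengths d.length d.length (by omega) le_rfl (by exact_mod_cast hpass)
      (by exact_mod_cast hfail)]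
    rw [hlen]
  | succ f ih =>
    have hklt : k < d.length := by omega
    rw [List.drop_eq_getElem_cons hklt, PySem.List.enumerate_cons]
    show eddAloop lengths d (((k : Int), d[k]) :: _) = _
    rw [eddAloop]
    split_ifs with hlt
    · -- first failing index: d[k] < (k+1)*1000
      rw [PySem.List.slice_to_natCast, needed_eq]
      have htake : pvCnt (d.take k) ((k : Int) + 1)
          = pvCnt d ((k : Int) + 1) := by
        unfold pvCnt
        rw [countP_split d ((k : Int) + 1) k,
          countP_drop_zero d hpw ((k : Int) + 1) k hklt hlt]
        simp
      have htk_le : pvCnt (d.take k) ((k : Int) + 1) ≤ (k : Int) := by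
        have h1 := pvCnt_le_len (d.take k) ((k : Int) + 1)
        have h2 : (d.take k).length = k := by rw [List.length_take]; omega
        rw [h2] at h1
        exact h1
      rcases Nat.eq_zero_or_pos k with hk0 | hk1
      · subst hk0
        have hc0 : pvCnt (d.take 0) ((0 : Nat) + 1) = 0 := by
          simp [pvCnt]
        rw [pvRef_zero lengths d.length (by
          have h1 : pvCnt lengths 1 = pvCnt d 1 := (hcnt 1).symm
          have h2 : ((0 : Nat) : Int) + 1 = 1 := by norm_num
          rw [h2] at htake hc0
          omega)]
        rw [hc0]
        norm_num
      · have hpass : (k : Int) ≤ pvCnt lengths (k : Int) := by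
          rw [← hcnt]
          apply pvCnt_ge_of_prefix d _ k (by omega)
          intro j hj
          have h1 : d[j]'(by omega) ≥ d[k - 1]'(by omega) :=
            sorted_getElem_anti d hpw (by omega) (by omega)
          have h2 := hpref (k - 1) (by omega)
          have h3 : (((k - 1 : Nat) : Int) + 1) = (k : Int) := by
            omega
          rw [h3] at h2
          omega
        have hfail : pvCnt lengths ((k : Int) + 1) ≤ (k : Int) := by
          rw [← hcnt, ← htake]
          exact htk_le
        rw [pvRef_hit lengths k d.length hk1 (by omega) hpass hfail]
        rw [htake, hcnt]
    · apply ih (k + 1) (by omega) _ (by omega)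
      intro j hj
      rcases Nat.lt_or_ge j k with h1 | h1
      · exact hpref j h1
      · have hjk : j = k := by omega
        subst hjk
        omega

lemma countP_le_split (m : List Int) (i : Int) :
    m.countP (fun x => decide (i ≤ x)) = m.countP (fun x => decide (i + 1 ≤ x)) + m.count i := by
  induction m with
  | nil => simp
  | cons a t ih =>
    rw [List.countP_cons, List.countP_cons, List.count_cons, ih]
    rcases lt_trichotomy a i with hc | hc | hc
    · simp only [show decide (i ≤ a) = false by simp; omega,
        show decide (i + 1 ≤ a) = false by simp; omega,
        show (a == i) = false by simp; omega]
      simp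
    · subst hc
      simp only [show decide (a ≤ a) = true by simp,
        show decide (a + 1 ≤ a) = false by simp,
        show (a == a) = true by simp]
      simp
      omega
    · simp only [show decide (i ≤ a) = true by simp; omega,
        show decide (i + 1 ≤ a) = true by simp; omega,
        show (a == i) = false by simp; omega]
      simp
      omega

lemma pvBucket_le (L n : Int) (hn : 0 ≤ n) : pvBucket L n ≤ n + 1 := by
  simp only [pvBucket]
  split_ifs <;> omega

lemma pvBucket_decide (L n i : Int) (_hn : 0 ≤ n) (h1 : 1 ≤ i) (h2 : i ≤ n + 1) :
    decide (i ≤ pvBucket L n) = decide (i * 1000 ≤ L) := by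
  have hb := PySem.Int.le_floordiv_iff_mul_le (a := L) (b := 1000) (q := i) (by norm_num)
  simp only [pvBucket, decide_eq_decide]
  rw [← hb]
  split_ifs with g1 g2 <;> omega

lemma pvCntB_eq_pvCnt (ls : List Int) (i : Int) (h1 : 1 ≤ i) (h2 : i ≤ (ls.length : Int) + 1) :
    pvCntB ls i = pvCnt ls i := by
  unfold pvCntB pvCnt
  rw [List.countP_map]
  congr 1
  apply List.countP_congr
  intro L _
  simp only [Function.comp_apply]
  rw [pvBucket_decide L (ls.length : Int) i (by positivity) h1 h2]

lemma buckets_getD_gen (ls : List Int) (n : Int) (d : PySem.Dict Int Int) (v : Int) :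
    ((ls.foldl (fun d length =>
        let b := pvBucket length n
        d.insert b (d.getD b 0 + 1)) d).getD v 0)
      = d.getD v 0 + ((ls.map (fun L => pvBucket L n)).count v : Int) := by
  induction ls generalizing d with
  | nil => simp
  | cons a t ih =>
    rw [List.foldl_cons, ih, List.map_cons, List.count_cons]
    by_cases h : pvBucket a n = v
    · rw [PySem.Dict.getD_insert, if_pos h.symm, h]
      simp
      omega
    · rw [PySem.Dict.getD_insert, if_neg (fun hv => h hv.symm)]
      have : (pvBucket a n == v) = false := by simp [h]
      rw [this]
      simp

lemma buckets_getD (lengths : List Int) (v : Int) :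
    ((lengths.foldl (fun d length =>
        let b := pvBucket length (lengths.length : Int)
        d.insert b (d.getD b 0 + 1)) PySem.Dict.empty).getD v 0)
      = ((lengths.map (fun L => pvBucket L (lengths.length : Int))).count v : Int) := by
  rw [buckets_getD_gen, PySem.Dict.getD_empty, zero_add]

lemma pvCntB_split (lengths : List Int) (i : Int) :
    pvCntB lengths i = pvCntB lengths (i + 1)
      + ((lengths.map (fun L => pvBucket L (lengths.length : Int))).count i : Int) := by
  unfold pvCntB
  exact_mod_cast congrArg (Nat.cast : Nat → Int)
    (countP_le_split (lengths.map (fun L => pvBucket L (lengths.length : Int))) i)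

lemma eddBloop_spec (lengths : List Int) (k : Nat) (hk : k ≤ lengths.length) :
    eddBloop (lengths.foldl (fun d length =>
        let b := pvBucket length (lengths.length : Int)
        d.insert b (d.getD b 0 + 1)) PySem.Dict.empty)
      (pvCntB lengths ((k : Int) + 1)) (PySem.List.pyRange (k : Int) 0 (-1))
      = pvRef lengths k := by
  induction k with
  | zero =>
    rw [show ((0 : Nat) : Int) = 0 from rfl, PySem.List.pyRange_neg_one_eq_nil (le_refl 0)]
    rfl
  | succ k ih =>
    have hk' : k ≤ lengths.length := by omega
    have hcons : PySem.List.pyRange ((k + 1 : Nat) : Int) 0 (-1)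
        = ((k + 1 : Nat) : Int) :: PySem.List.pyRange ((k : Nat) : Int) 0 (-1) := by
      rw [PySem.List.pyRange_neg_one_cons (by push_cast; omega)]
      congr 1
      push_cast
      ring
    rw [hcons, eddBloop, buckets_getD]
    rw [show pvCntB lengths (((k + 1 : Nat) : Int) + 1)
          + ((lengths.map (fun L => pvBucket L (lengths.length : Int))).count ((k + 1 : Nat) : Int) : Int)
        = pvCntB lengths ((k + 1 : Nat) : Int) from (pvCntB_split lengths _).symm]
    have h1 : pvCntB lengths ((k + 1 : Nat) : Int) = pvCnt lengths ((k + 1 : Nat) : Int) :=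
      pvCntB_eq_pvCnt _ _ (by push_cast; omega) (by push_cast; omega)
    have h2 : pvCntB lengths (((k + 1 : Nat) : Int) + 1) = pvCnt lengths (((k + 1 : Nat) : Int) + 1) :=
      pvCntB_eq_pvCnt _ _ (by push_cast; omega) (by push_cast; omega)
    rw [h1, h2, pvRef]
    have hcast : ((k + 1 : Nat) : Int) = (k : Int) + 1 := by push_cast; ring
    rw [hcast]
    split_ifs with hcond
    · rw [show ((k : Int) + 1 + 1) = (k : Int) + 2 by ring]
    · have h1' := h1
      rw [hcast] at h1'
      rw [← h1']
      exact ih hk'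

lemma eddington_alt_eq (lengths : List Int) : eddington_alt lengths = pvRef lengths lengths.length := by
  simp only [eddington_alt]
  rw [PySem.List.pyRange_neg_one_cons (by omega), eddBloop, buckets_getD]
  have hble : ∀ x ∈ lengths.map (fun L => pvBucket L (lengths.length : Int)),
      x ≤ (lengths.length : Int) + 1 := by
    intro x hx
    obtain ⟨L, _, rfl⟩ := List.mem_map.mp hx
    exact pvBucket_le L _ (by positivity)
  have hcnt_le : ((lengths.map (fun L => pvBucket L (lengths.length : Int))).count
      ((lengths.length : Int) + 1) : Int) ≤ (lengths.length : Int) := by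
    have := List.count_le_length (l := lengths.map (fun L => pvBucket L (lengths.length : Int)))
      (a := (lengths.length : Int))
    have h2 := List.count_le_length (l := lengths.map (fun L => pvBucket L (lengths.length : Int)))
      (a := (lengths.length : Int) + 1)
    rw [List.length_map] at h2
    exact_mod_cast h2
  rw [if_neg (by omega)]
  have hzero : (lengths.map (fun L => pvBucket L (lengths.length : Int))).countP
      (fun x => decide ((lengths.length : Int) + 1 + 1 ≤ x)) = 0 := by
    rw [List.countP_eq_zero]
    intro a ha
    have := hble a ha
    simp only [decide_eq_true_eq]
    omega
  have hc : 0 + ((lengths.map (fun L => pvBucket L (lengths.length : Int))).count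
      ((lengths.length : Int) + 1) : Int) = pvCntB lengths ((lengths.length : Int) + 1) := by
    rw [pvCntB_split lengths ((lengths.length : Int) + 1)]
    unfold pvCntB
    rw [hzero]
    simp
  rw [show ((lengths.length : Int) + 1 - 1) = (lengths.length : Int) by ring, hc]
  exact eddBloop_spec lengths lengths.length le_rfl

lemma eddington_eq (lengths : List Int) : eddington lengths = pvRef lengths lengths.length := by
  by_cases h : lengths = []
  · subst h
    rfl
  · simp only [eddington, if_neg h]
    have hperm : (PySem.List.sorted lengths (fun x => x) true).Perm lengths :=
      PySem.List.sorted_perm lengths (fun x => x) true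
    have hpw : (PySem.List.sorted lengths (fun x => x) true).Pairwise (fun a b => b ≤ a) := by
      simpa using PySem.List.sorted_pairwise_rev lengths (fun x => x)
    have hne : PySem.List.sorted lengths (fun x => x) true ≠ [] := by
      rw [Ne, PySem.List.sorted_eq_nil_iff]
      exact h
    have hmain := eddAloop_spec lengths _ hperm hpw hne 0 (Nat.zero_le _)
      (fun j hj => absurd hj (Nat.not_lt_zero j))
    rw [List.drop_zero, show ((0 : Nat) : Int) = 0 from rfl] at hmain
    rw [hmain, hperm.length_eq]

-- ===== VERDICT (by name: the statement is the Claim_ definition above) =====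
theorem eddington_spec : Claim_equal_eddington := by
  intro lengths _
  unfold Spec_eddington
  rw [eddington_eq, eddington_alt_eq]
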